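-- pv_equiv track=rewrite | github.com/byee4/rna-editing | scripts/make_small_fastq_dataset.py | cigar_ref_span
-- ===== SOURCE A (Python) =====
-- def cigar_ref_span(cigar: str) -> int:
--     # Operations consuming reference: M, D, N, =, X
--     span = 0
--     num = ""
--     for c in cigar:
--         if c.isdigit():
--             num += c
--             continue
--         if not num:
--             continue
--         n = int(num)
--         if c in {"M", "D", "N", "=", "X"}:
--             span += n
--         num = ""
--     return span
-- ===== SOURCE B (Python) =====
-- def cigar_ref_span(cigar: str) -> int:
--     # Tokenize by index: find each maximal ASCII-digit run, then look at the
--     # single operation character that follows it; no per-char accumulator string.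
--     span = 0
--     i, L = 0, len(cigar)
--     while i < L:
--         j = i
--         while j < L and "0" <= cigar[j] <= "9":
--             j += 1
--         if i < j < L and cigar[j] in "MDN=X":
--             span += int(cigar[i:j])
--         i = j + 1
--     return span
-- ===== Notes on version B (the rewrite author's own statement) =====
-- stated objective: alternative
-- what changed: Replaces A's per-character state machine with a mutable digit-accumulator string by an index-based tokenizer that locates each maximal digit run with an inner scan and converts the slice once when a reference-consuming op char follows it.
import Mathlib
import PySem

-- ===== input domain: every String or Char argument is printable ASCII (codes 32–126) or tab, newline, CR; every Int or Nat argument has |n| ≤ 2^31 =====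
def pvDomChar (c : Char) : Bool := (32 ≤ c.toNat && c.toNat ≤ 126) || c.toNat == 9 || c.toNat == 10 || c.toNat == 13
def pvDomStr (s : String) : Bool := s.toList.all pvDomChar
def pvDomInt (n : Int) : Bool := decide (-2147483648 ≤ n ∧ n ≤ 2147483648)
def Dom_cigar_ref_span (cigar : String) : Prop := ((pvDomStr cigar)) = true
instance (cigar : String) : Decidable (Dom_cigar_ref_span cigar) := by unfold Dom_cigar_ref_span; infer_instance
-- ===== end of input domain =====

-- B replaces A's per-character state machine (mutable digit-accumulator string) by an
-- index-based tokenizer over maximal digit runs (inner scan + slice); objective: alternative.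

-- ===== PORT A =====
-- one iteration of A's for-loop; state = (span, num)
def cigarStepA (st : Int × List Char) (c : Char) : Int × List Char :=
  if PySem.Chars.isdigit c then (st.1, st.2 ++ [c])
  else if st.2 = [] then st
  else
    -- int(num): num is a nonempty run of ASCII digits here, so ofChars? is always `some`
    let n := (PySem.Int.ofChars? st.2).getD 0
    (if c ∈ ['M', 'D', 'N', '=', 'X'] then st.1 + n else st.1, [])

def cigar_ref_span (cigar : String) : Int :=
  (cigar.toList.foldl cigarStepA (0, [])).1

-- ===== PORT B =====
-- inner `while j < L and "0" <= cigar[j] <= "9": j += 1` of Source B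
def cigarRunEnd (cs : List Char) (j : Nat) : Nat :=
  if h : j < cs.length ∧ '0' ≤ cs.getD j ' ' ∧ cs.getD j ' ' ≤ '9' then
    cigarRunEnd cs (j + 1)
  else j
termination_by cs.length - j
decreasing_by omega

-- needed by the outer loop's termination: j only moves forward
theorem le_cigarRunEnd (cs : List Char) (j : Nat) : j ≤ cigarRunEnd cs j := by
  fun_induction cigarRunEnd cs j with
  | case1 j h ih => omega
  | case2 j h => exact Nat.le_refl j

-- outer `while i < L` of Source B
def cigarOuterB (cs : List Char) (i : Nat) (span : Int) : Int :=
  if i < cs.length then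
    -- j := end of the digit run; span updated if a reference-consuming op char follows it
    cigarOuterB cs (cigarRunEnd cs i + 1)
      (if i < cigarRunEnd cs i ∧ cigarRunEnd cs i < cs.length ∧
          cs.getD (cigarRunEnd cs i) ' ' ∈ ['M', 'D', 'N', '=', 'X'] then
        span + (PySem.Int.ofChars? (PySem.List.slice cs (some (i : Int))
          (some ((cigarRunEnd cs i : Nat) : Int)))).getD 0
      else span)
  else span
termination_by cs.length - i
decreasing_by have := le_cigarRunEnd cs i; omega

def cigar_ref_span_alt (cigar : String) : Int :=
  cigarOuterB cigar.toList 0 0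

-- ===== PRECONDITION & SPEC =====
def Spec_cigar_ref_span (cigar : String) (out : Int) : Prop := out = cigar_ref_span_alt cigar
instance (cigar : String) (out : Int) : Decidable (Spec_cigar_ref_span cigar out) := by unfold Spec_cigar_ref_span; infer_instance

-- ===== CLAIM (what is proved, stated in full; the proofs are below) =====
def Claim_equal_cigar_ref_span : Prop := ∀ (cigar : String), Dom_cigar_ref_span cigar → Spec_cigar_ref_span cigar (cigar_ref_span cigar)

-- ===== LEMMAS AND PROOFS =====

theorem drop_cons_getD (l : List Char) (i : Nat) (h : i < l.length) :
    l.drop i = l.getD i ' ' :: l.drop (i + 1) := by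
  rw [List.getD_eq_getElem l ' ' h]
  exact List.drop_eq_getElem_cons h

-- the inner while-loop finds the end of the maximal digit run starting at j
theorem cigarRunEnd_spec (cs : List Char) (j : Nat) :
    cigarRunEnd cs j = j + ((cs.drop j).takeWhile PySem.Chars.isdigit).length := by
  fun_induction cigarRunEnd cs j with
  | case1 j h ih =>
      obtain ⟨hj, h0, h9⟩ := h
      rw [drop_cons_getD cs j hj, List.takeWhile_cons_of_pos
        (by simp only [PySem.Chars.isdigit, Bool.and_eq_true, decide_eq_true_eq]
            exact ⟨h0, h9⟩)]
      simp only [List.length_cons]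
      omega
  | case2 j h =>
      rcases Nat.lt_or_ge j cs.length with hj | hj
      · have hnd : ¬ ('0' ≤ cs.getD j ' ' ∧ cs.getD j ' ' ≤ '9') := by tauto
        rw [drop_cons_getD cs j hj, List.takeWhile_cons_of_neg
          (by simp only [PySem.Chars.isdigit, Bool.and_eq_true, decide_eq_true_eq]
              exact hnd)]
        simp
      · rw [List.drop_eq_nil_of_le hj]; simp

-- A's loop swallows a run of digits into the accumulator `num`
theorem foldl_stepA_digits (d : List Char) (hd : ∀ c ∈ d, PySem.Chars.isdigit c = true) :
    ∀ (r : List Char) (s : Int) (num : List Char),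
      List.foldl cigarStepA (s, num) (d ++ r) = List.foldl cigarStepA (s, num ++ d) r := by
  induction d with
  | nil => intro r s num; simp
  | cons c d ih =>
      intro r s num
      have hc : PySem.Chars.isdigit c = true := hd c (by simp)
      simp only [List.cons_append, List.foldl_cons, cigarStepA, hc, if_pos]
      rw [ih (fun x hx => hd x (by simp [hx])) r s (num ++ [c])]
      simp

-- the heart: B's outer loop computes A's fold over the remaining suffix (num = "")
theorem outerB_eq_foldA (cs : List Char) :
    ∀ (n i : Nat) (s : Int), cs.length - i ≤ n →
      cigarOuterB cs i s = (List.foldl cigarStepA (s, []) (cs.drop i)).1 := by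
  intro n
  induction n with
  | zero =>
      intro i s hn
      rw [cigarOuterB, if_neg (by omega), List.drop_eq_nil_of_le (by omega)]
      simp
  | succ n ih =>
      intro i s hn
      rcases Nat.lt_or_ge i cs.length with hi | hi
      · obtain ⟨l, hl⟩ : ∃ l, cs.drop i = l := ⟨_, rfl⟩
        obtain ⟨d, hdd⟩ : ∃ d, l.takeWhile PySem.Chars.isdigit = d := ⟨_, rfl⟩
        obtain ⟨r, hrr⟩ : ∃ r, l.dropWhile PySem.Chars.isdigit = r := ⟨_, rfl⟩
        have hlen : l.length = cs.length - i := by rw [← hl]; simp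
        have hdr : d ++ r = l := by rw [← hdd, ← hrr]; exact List.takeWhile_append_dropWhile
        have hdrlen : d.length + r.length = l.length := by rw [← List.length_append, hdr]
        have hdp : ∀ c ∈ d, PySem.Chars.isdigit c = true :=
          fun c hc => List.mem_takeWhile_imp (by rw [hdd]; exact hc)
        have hj : cigarRunEnd cs i = i + d.length := by
          rw [cigarRunEnd_spec cs i, hl, hdd]
        have hfold : List.foldl cigarStepA (s, []) l = List.foldl cigarStepA (s, d) r := by
          rw [← hdr, foldl_stepA_digits d hdp r s []]; simp
        -- the slice taken for int(cigar[i:j]) is exactly the digit run d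
        have hslice : PySem.List.slice cs (some (i : Int))
            (some ((cigarRunEnd cs i : Nat) : Int)) = d := by
          rw [PySem.List.slice_natCast, hj, Nat.add_sub_cancel_left, hl, ← hdd]
          have := List.prefix_iff_eq_take.mp (List.takeWhile_prefix (l := l)
            (p := PySem.Chars.isdigit))
          rw [hdd] at this ⊢
          exact this.symm
        rw [cigarOuterB, if_pos hi]
        rcases r with _ | ⟨c, r'⟩
        · -- trailing digits (r = []): j = L, no op follows, loop ends with span unchanged
          have hjL : cigarRunEnd cs i = cs.length := by
            simp only [List.length_nil] at hdrlen; omega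
          rw [if_neg (by omega)]
          rw [cigarOuterB, if_neg (by omega)]
          rw [hl, hfold]; simp
        · -- r = c :: r': c is the first non-digit, at index j
          have hcnd : PySem.Chars.isdigit c = false := by
            have h' := List.head_dropWhile_not (p := PySem.Chars.isdigit) (l := l)
              (by rw [hrr]; simp)
            simpa [hrr] using h'
          have hjlt : cigarRunEnd cs i < cs.length := by
            simp only [List.length_cons] at hdrlen; omega
          have hcsj : cs.drop (cigarRunEnd cs i) = c :: r' := by
            rw [hj, ← List.drop_drop, hl, ← hdr, List.drop_left]
          have h2 := (hcsj.symm.trans (drop_cons_getD cs _ hjlt))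
          have hcj : cs.getD (cigarRunEnd cs i) ' ' = c := by
            injection h2 with h2a h2b; exact h2a.symm
          have hdropr' : cs.drop (cigarRunEnd cs i + 1) = r' := by
            injection h2 with h2a h2b; exact h2b.symm
          by_cases hdnil : d = []
          · -- no digits before c: skip one character
            have hji : cigarRunEnd cs i = i := by rw [hj, hdnil]; simp
            rw [if_neg (by omega)]
            rw [ih (cigarRunEnd cs i + 1) s (by omega), hdropr']
            rw [hl, hfold, hdnil]
            simp [cigarStepA, hcnd]
          · have hij : i < cigarRunEnd cs i := by
              have : 0 < d.length := List.length_pos_iff.mpr hdnil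
              omega
            by_cases hcm : c ∈ ['M', 'D', 'N', '=', 'X']
            · rw [if_pos ⟨hij, hjlt, by rw [hcj]; exact hcm⟩]
              rw [ih (cigarRunEnd cs i + 1) _ (by omega), hdropr', hslice]
              rw [hl, hfold]
              simp only [List.foldl_cons, cigarStepA, hcnd, Bool.false_eq_true, if_false,
                if_neg hdnil, if_pos hcm]
            · rw [if_neg (by rw [hcj]; tauto)]
              rw [ih (cigarRunEnd cs i + 1) _ (by omega), hdropr']
              rw [hl, hfold]
              simp only [List.foldl_cons, cigarStepA, hcnd, Bool.false_eq_true, if_false,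
                if_neg hdnil, if_neg hcm]
      · rw [cigarOuterB, if_neg (by omega), List.drop_eq_nil_of_le hi]; simp

-- ===== VERDICT (by name: the statement is the Claim_ definition above) =====
theorem cigar_ref_span_spec : Claim_equal_cigar_ref_span := by
  intro cigar _
  unfold Spec_cigar_ref_span cigar_ref_span cigar_ref_span_alt
  rw [outerB_eq_foldA cigar.toList cigar.toList.length 0 0 (by omega)]
  simp
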